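-- pv_equiv track=rewrite | github.com/sup41kkk/Ciphers | decryptionVigenere.py | compute_letter_frequencies
-- ===== SOURCE A (Python) =====
-- def compute_letter_frequencies(columns, alphabet):
--     """
--     Подсчитывает частоты появления каждой буквы в каждом столбце.
--     """
--     letter_to_index = {char: idx for idx, char in enumerate(alphabet)}
--     frequencies = []
--     for column in columns:
--         count = [0] * len(alphabet)
--         for char in column:
--             if char in letter_to_index:
--                 count[letter_to_index[char]] += 1
--         frequencies.append(count)
--     return frequencies
-- ===== SOURCE B (Python) =====
-- def compute_letter_frequencies(columns, alphabet):
--     return [[column.count(letter) for letter in alphabet] for column in columns]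
-- ===== Notes on version B (the rewrite author's own statement) =====
-- stated objective: simpler
-- what changed: Replaces A's precomputed char->index dict and per-character increment loop over a mutable count array with a direct nested comprehension that counts each alphabet letter in each column via list.count.
-- outside the precondition, e.g. on compute_letter_frequencies([['a']], 'aa'): A returns [[0, 1]], B returns [[1, 1]]
import Mathlib
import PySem

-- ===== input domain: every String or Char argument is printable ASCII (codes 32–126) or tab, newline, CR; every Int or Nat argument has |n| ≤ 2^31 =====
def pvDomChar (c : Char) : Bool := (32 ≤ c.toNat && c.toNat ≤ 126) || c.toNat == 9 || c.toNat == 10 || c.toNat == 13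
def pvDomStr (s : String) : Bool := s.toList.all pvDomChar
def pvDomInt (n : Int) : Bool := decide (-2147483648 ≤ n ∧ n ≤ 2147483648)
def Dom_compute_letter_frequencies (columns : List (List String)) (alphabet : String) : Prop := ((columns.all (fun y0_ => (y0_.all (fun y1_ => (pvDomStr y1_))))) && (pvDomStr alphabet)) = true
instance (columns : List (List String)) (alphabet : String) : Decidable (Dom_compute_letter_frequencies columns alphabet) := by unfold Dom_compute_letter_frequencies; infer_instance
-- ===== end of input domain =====

-- ===== PORT A =====
-- B replaces A's char->index dict + per-character increment loop by counting each
-- alphabet letter directly in each column (objective: simpler); equal whenever the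
-- alphabet has no duplicate letters (Pre_).
def pvStep (g : String → Option Int) (count : List Int) (ch : String) : List Int :=
  match g ch with
  | some idx => PySem.List.pySetD count idx (PySem.List.pyGetD count idx 0 + 1)
  | none => count

def compute_letter_frequencies (columns : List (List String)) (alphabet : String) : List (List Int) :=
  let letter_to_index : PySem.Dict String Int :=
    (PySem.List.enumerate alphabet.toList 0).foldl
      (fun d p => d.insert (String.ofList [p.2]) p.1) PySem.Dict.empty
  columns.foldl
    (fun frequencies column =>
      frequencies ++
        [column.foldl (pvStep letter_to_index.get?)
          (List.replicate alphabet.toList.length (0 : Int))])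
    []

-- ===== PORT B =====
def compute_letter_frequencies_alt (columns : List (List String)) (alphabet : String) : List (List Int) :=
  columns.map (fun column =>
    alphabet.toList.map (fun letter => (PySem.List.count column (String.ofList [letter]) : Int)))

-- ===== PRECONDITION & SPEC =====
-- Pre_ excludes alphabets with a repeated letter: there A's dict keeps only the LAST
-- index of the duplicate (earlier slots stay 0) while B counts at every duplicate
-- position — a duplicate-key corner where either value is defensible.
def Pre_compute_letter_frequencies (columns : List (List String)) (alphabet : String) : Prop :=
  alphabet.toList.Nodup
instance (columns : List (List String)) (alphabet : String) : Decidable (Pre_compute_letter_frequencies columns alphabet) := by unfold Pre_compute_letter_frequencies; infer_instance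

def pvWitness_compute_letter_frequencies : List (List String) × String :=
  ([["a"], ["b", "a", "!", "ab"]], "ab")

def Spec_compute_letter_frequencies (columns : List (List String)) (alphabet : String) (out : List (List Int)) : Prop := out = compute_letter_frequencies_alt columns alphabet
instance (columns : List (List String)) (alphabet : String) (out : List (List Int)) : Decidable (Spec_compute_letter_frequencies columns alphabet out) := by unfold Spec_compute_letter_frequencies; infer_instance

-- ===== CLAIM (what is proved, stated in full; the proofs are below) =====
def Claim_equal_compute_letter_frequencies : Prop := ∀ (columns : List (List String)) (alphabet : String), Dom_compute_letter_frequencies columns alphabet → Pre_compute_letter_frequencies columns alphabet → Spec_compute_letter_frequencies columns alphabet (compute_letter_frequencies columns alphabet)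

-- ===== LEMMAS AND PROOFS =====

theorem pvSingle_inj {a b : Char} (h : String.ofList [a] = String.ofList [b]) : a = b := by
  have := congrArg String.toList h
  simpa using this

-- lookup in a dict built by a foldl of inserts, when the inserted keys are distinct
theorem pvGet?_foldl_insert {α κ ν : Type} [BEq κ] [LawfulBEq κ]
    (kvs : List α) (key : α → κ) (val : α → ν) (d : PySem.Dict κ ν)
    (hnd : (kvs.map key).Nodup) (k : κ) :
    (kvs.foldl (fun d p => d.insert (key p) (val p)) d).get? k =
      match kvs.find? (fun p => key p == k) with
      | some p => some (val p)
      | none => d.get? k := by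
  induction kvs generalizing d with
  | nil => simp
  | cons a rest ih =>
    simp only [List.map_cons, List.nodup_cons] at hnd
    simp only [List.foldl_cons]
    by_cases hk : key a = k
    · have hfind : rest.find? (fun p => key p == k) = none := by
        apply List.find?_eq_none.2
        intro x hx hpx
        exact hnd.1 (by
          have : key x = k := by simpa using hpx
          rw [hk, ← this]; exact List.mem_map_of_mem hx)
      rw [ih _ hnd.2, hfind, List.find?_cons_of_pos (by simpa using hk)]
      simp [hk, PySem.Dict.get?_insert_self]
    · rw [ih _ hnd.2, List.find?_cons_of_neg (by simpa using hk)]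
      cases hf : rest.find? (fun p => key p == k) with
      | some p => simp
      | none => simp [PySem.Dict.get?_insert_of_ne d (val a) (fun h => hk h.symm)]

theorem pvFind?_enum_of_first {q : Char → Bool} :
    ∀ (L : List Char) (s0 : Int) (j : Nat) (hj : j < L.length),
      q L[j] = true → (∀ i (hi : i < j), q (L[i]'(by omega)) = false) →
      (PySem.List.enumerate L s0).find? (fun p => q p.2) = some (s0 + j, L[j])
  | c :: rest, s0, 0, hj, hq, _ => by
      simp only [List.getElem_cons_zero] at hq
      rw [PySem.List.enumerate_cons, List.find?_cons_of_pos (by simpa using hq)]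
      simp
  | c :: rest, s0, j + 1, hj, hq, hmin => by
      have h0 : q c = false := hmin 0 (by omega)
      rw [PySem.List.enumerate_cons, List.find?_cons_of_neg (by simp [h0])]
      have := pvFind?_enum_of_first rest (s0 + 1) j (by simpa using Nat.lt_of_succ_lt_succ hj)
        (by simpa using hq) (fun i hi => by simpa using hmin (i + 1) (by omega))
      rw [this]
      have harith : s0 + 1 + (j : Int) = s0 + ((j + 1 : Nat) : Int) := by push_cast; ring
      simp [harith]

theorem pvFind?_enum_some {q : Char → Bool} :
    ∀ (L : List Char) (s0 : Int) (p' : Int × Char),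
      (PySem.List.enumerate L s0).find? (fun p => q p.2) = some p' →
      ∃ j : Nat, ∃ hj : j < L.length, p' = (s0 + j, L[j]) ∧ q L[j] = true
  | [], s0, p', h => by simp at h
  | c :: rest, s0, p', h => by
      rw [PySem.List.enumerate_cons] at h
      by_cases hq : q c = true
      · rw [List.find?_cons_of_pos (by simpa using hq)] at h
        refine ⟨0, by simp, ?_, by simpa using hq⟩
        have := (Option.some.inj h).symm
        simpa using this
      · rw [List.find?_cons_of_neg (by simpa using hq)] at h
        obtain ⟨j, hj, hp, hqj⟩ := pvFind?_enum_some rest (s0 + 1) p' h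
        refine ⟨j + 1, by simpa using Nat.succ_lt_succ hj, ?_, by simpa using hqj⟩
        rw [hp]
        have harith : s0 + 1 + (j : Int) = s0 + ((j + 1 : Nat) : Int) := by push_cast; ring
        simp [harith]

-- the dict A builds: characterisation of get? on a duplicate-free alphabet
theorem pvG_char (L : List Char) (hn : L.Nodup) (s : String) (v : Int) :
    ((PySem.List.enumerate L 0).foldl
        (fun d p => d.insert (String.ofList [p.2]) p.1) PySem.Dict.empty).get? s = some v ↔
      ∃ j : Nat, ∃ hj : j < L.length, v = (j : Int) ∧ s = String.ofList [L[j]] := by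
  have hnd : ((PySem.List.enumerate L 0).map (fun p => String.ofList [p.2])).Nodup := by
    have hmap : (PySem.List.enumerate L 0).map (fun p => String.ofList [p.2]) =
        L.map (fun c => String.ofList [c]) := by
      conv_rhs => rw [← PySem.List.map_snd_enumerate L 0]
      rw [List.map_map]
      rfl
    rw [hmap]
    exact hn.map (fun a b h => pvSingle_inj h)
  rw [pvGet?_foldl_insert (PySem.List.enumerate L 0) (fun p => String.ofList [p.2])
    (fun p => p.1) PySem.Dict.empty hnd s]
  constructor
  · intro h
    cases hf : (PySem.List.enumerate L 0).find? (fun p => String.ofList [p.2] == s) with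
    | none => rw [hf] at h; simp [PySem.Dict.get?_empty] at h
    | some p' =>
      rw [hf] at h
      obtain ⟨j, hj, hp, hq⟩ :=
        pvFind?_enum_some (q := fun c => String.ofList [c] == s) L 0 p' hf
      refine ⟨j, hj, ?_, ?_⟩
      · simp only at h
        rw [hp] at h
        simp only [Option.some.injEq] at h
        omega
      · exact (by simpa using hq : String.ofList [L[j]] = s).symm
  · rintro ⟨j, hj, hv, hs⟩
    have hq : (fun c => String.ofList [c] == s) L[j] = true := by simp [hs]
    have hmin : ∀ i (hi : i < j), (fun c => String.ofList [c] == s) (L[i]'(by omega)) = false := by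
      intro i hi
      simp only [beq_eq_false_iff_ne, ne_eq]
      intro hcontra
      rw [hs] at hcontra
      have : L[i]'(by omega) = L[j] := pvSingle_inj hcontra
      exact absurd (hn.getElem_inj_iff.1 this) (by omega)
    rw [pvFind?_enum_of_first (q := fun c => String.ofList [c] == s) L 0 j hj hq hmin]
    simp [hv]

theorem pvStep_length (g : String → Option Int) (count : List Int) (ch : String) :
    (pvStep g count ch).length = count.length := by
  unfold pvStep
  cases g ch with
  | none => rfl
  | some idx => simp [PySem.List.length_pySetD]

theorem pvFold_length (g : String → Option Int) :
    ∀ (col : List String) (count : List Int),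
      (col.foldl (pvStep g) count).length = count.length
  | [], count => rfl
  | ch :: rest, count => by
      rw [List.foldl_cons, pvFold_length g rest, pvStep_length]

-- loop invariant for A's inner loop: each slot accumulates the count of its letter
theorem pvFold_getD (L : List Char) (hn : L.Nodup)
    (g : String → Option Int)
    (hg : ∀ s v, g s = some v ↔
      ∃ j : Nat, ∃ hj : j < L.length, v = (j : Int) ∧ s = String.ofList [L[j]]) :
    ∀ (col : List String) (count : List Int), count.length = L.length →
      ∀ (j : Nat) (hj : j < L.length),
      PySem.List.pyGetD (col.foldl (pvStep g) count) (j : Int) 0 =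
        PySem.List.pyGetD count (j : Int) 0 + (col.count (String.ofList [L[j]]) : Int)
  | [], count, hlen, j, hj => by simp
  | ch :: rest, count, hlen, j, hj => by
      rw [List.foldl_cons,
        pvFold_getD L hn g hg rest (pvStep g count ch)
          (by rw [pvStep_length]; exact hlen) j hj]
      unfold pvStep
      cases hch : g ch with
      | none =>
        have hne : ch ≠ String.ofList [L[j]] := by
          intro h
          have : g ch = some (j : Int) := (hg ch (j : Int)).2 ⟨j, hj, rfl, h⟩
          rw [hch] at this
          simp at this
        rw [List.count_cons_of_ne hne]
      | some idx =>
        obtain ⟨k, hk, hv, hs⟩ := (hg ch idx).1 hch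
        subst hv
        rw [PySem.List.pyGetD_pySetD_natCast count k j _ 0 (by omega)]
        by_cases hjk : j = k
        · subst hjk
          rw [hs, List.count_cons_self, if_pos rfl]
          push_cast
          ring
        · rw [if_neg hjk]
          have hne : ch ≠ String.ofList [L[j]] := by
            rw [hs]
            intro h
            exact hjk ((hn.getElem_inj_iff.1 (pvSingle_inj h)).symm)
          rw [List.count_cons_of_ne hne]

-- per-column equality: A's inner loop result is B's per-letter count vector
theorem pvColumn_eq (L : List Char) (hn : L.Nodup) (col : List String) :
    col.foldl
        (pvStep ((PySem.List.enumerate L 0).foldl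
          (fun d p => d.insert (String.ofList [p.2]) p.1) PySem.Dict.empty).get?)
        (List.replicate L.length (0 : Int)) =
      L.map (fun letter => (PySem.List.count col (String.ofList [letter]) : Int)) := by
  apply List.ext_getElem
  · rw [pvFold_length]; simp
  · intro j hj1 hj2
    have hjL : j < L.length := by simpa using hj2
    have hfoldlen :
        (col.foldl
          (pvStep ((PySem.List.enumerate L 0).foldl
            (fun d p => d.insert (String.ofList [p.2]) p.1) PySem.Dict.empty).get?)
          (List.replicate L.length (0 : Int))).length = L.length := by
      rw [pvFold_length]; simp
    have hmain := pvFold_getD L hn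
      ((PySem.List.enumerate L 0).foldl
        (fun d p => d.insert (String.ofList [p.2]) p.1) PySem.Dict.empty).get?
      (pvG_char L hn) col (List.replicate L.length (0 : Int)) (by simp) j hjL
    rw [PySem.List.pyGetD_eq_getElem _ 0 (by positivity)
        (by rw [hfoldlen]; exact_mod_cast hjL),
      PySem.List.pyGetD_eq_getElem _ 0 (by positivity)
        (by simp; exact_mod_cast hjL)] at hmain
    simp only [Int.toNat_natCast] at hmain
    rw [List.getElem_map]
    rw [hmain]
    simp [PySem.List.count_eq]

-- ===== VERDICT (by name: the statement is the Claim_ definition above) =====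
theorem compute_letter_frequencies_spec : Claim_equal_compute_letter_frequencies := by
  intro columns alphabet _ hpre
  simp only [Spec_compute_letter_frequencies, compute_letter_frequencies,
    compute_letter_frequencies_alt]
  rw [PySem.List.foldl_append_singleton_eq_map, List.nil_append]
  exact List.map_congr_left (fun col _ => pvColumn_eq alphabet.toList hpre col)
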